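-- pv_equiv track=rewrite | github.com/Vishnyakova-PA/lab04 | lib.py | check_lists
-- ===== SOURCE A (Python) =====
-- def check_lists(myList):
--     # кол-во одинаковых элементов
--     count = 0
--
--     # перебираем элементы 1 списка
--     for i in range(3):
--         # кол-во списков (начиная со 2), где найден элемент
--         a = 0
--
--         # перебираем все списки начиная со 2
--         for j in range(1, len(myList)):
--
--             # если элемент есть в этом списке
--             if myList[0][i] in myList[j]:
--                 a += 1
--
--         # если элемент есть в каждом из списков
--         if len(myList) - 1 == a:
--             count += 1
--     return count
-- ===== SOURCE B (Python) =====
-- def check_lists(myList):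
--     # Intersection of all sublists after the first; None means "no constraint yet"
--     # (the intersection over an empty family contains everything).
--     common = None
--     for sub in myList[1:]:
--         s = set(sub)
--         common = s if common is None else common & s
--     return sum(common is None or myList[0][i] in common for i in range(3))
-- ===== Notes on version B (the rewrite author's own statement) =====
-- stated objective: simpler
-- what changed: B folds all sublists after the first into one intersection set (None = no constraint yet) and does three membership lookups, instead of A's three repeated scans over every sublist with a per-element counter compared to len-1; Pre_ excludes the empty list, where with no first sublist any value is an accidental corner (A yields 0 from len-1 == -1 never matching, B yields 3 from the vacuous intersection), and the inputs where A raises IndexError (two or more sublists with the first shorter than 3).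
-- outside the precondition, e.g. on check_lists([]): A returns 0, B returns 3
import Mathlib
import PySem

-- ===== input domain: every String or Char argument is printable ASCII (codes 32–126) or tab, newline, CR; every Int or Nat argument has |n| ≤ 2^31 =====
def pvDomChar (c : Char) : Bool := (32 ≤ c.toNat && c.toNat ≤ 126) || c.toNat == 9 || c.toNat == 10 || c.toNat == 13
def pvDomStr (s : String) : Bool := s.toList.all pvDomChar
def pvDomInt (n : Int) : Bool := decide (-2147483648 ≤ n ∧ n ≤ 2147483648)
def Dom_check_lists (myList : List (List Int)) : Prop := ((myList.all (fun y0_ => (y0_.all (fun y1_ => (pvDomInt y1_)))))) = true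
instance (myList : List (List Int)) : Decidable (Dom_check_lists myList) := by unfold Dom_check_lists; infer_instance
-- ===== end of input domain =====

-- B replaces A's three repeated scans over all sublists by one shared intersection
-- set folded once over the tail, then three membership lookups (objective: simpler).


-- ===== PORT A =====
def check_lists (myList : List (List Int)) : Int :=
  (PySem.List.pyRange 0 3 1).foldl (fun count i =>
    let a : Int := (PySem.List.pyRange 1 (myList.length : Int) 1).foldl (fun a j =>
      if (PySem.List.pyGetD myList j []).contains
           (PySem.List.pyGetD (PySem.List.pyGetD myList 0 []) i 0) then a + 1 else a) 0
    if (myList.length : Int) - 1 = a then count + 1 else count) 0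

-- ===== PORT B =====
def check_lists_alt (myList : List (List Int)) : Int :=
  let common : Option (PySem.Set Int) :=
    (PySem.List.slice myList (some 1) none).foldl
      (fun c sub =>
        let s := PySem.Set.ofList sub
        match c with
        | none => some s
        | some c => some (PySem.Set.inter c s)) none
  ((PySem.List.pyRange 0 3 1).map (fun i =>
      match common with
      | none => (1 : Int)
      | some c =>
        if PySem.Set.contains c (PySem.List.pyGetD (PySem.List.pyGetD myList 0 []) i 0)
        then 1 else 0)).sum

-- ===== PRECONDITION & SPEC =====
-- Pre_ excludes the empty list (no first sublist exists, so any value is an accidental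
-- corner: A's 0 and B's 3 are both artefacts) and the inputs where A raises IndexError
-- (at least two sublists but the first has fewer than 3 elements).
def Pre_check_lists (myList : List (List Int)) : Prop :=
  myList ≠ [] ∧ (myList.length = 1 ∨ 3 ≤ (myList.headD []).length)
instance (myList : List (List Int)) : Decidable (Pre_check_lists myList) := by
  unfold Pre_check_lists; infer_instance
def pvWitness_check_lists : List (List Int) := [[1, 2, 3], [2, 1], [5, 1, 2]]
def Spec_check_lists (myList : List (List Int)) (out : Int) : Prop := out = check_lists_alt myList
instance (myList : List (List Int)) (out : Int) : Decidable (Spec_check_lists myList out) := by unfold Spec_check_lists; infer_instance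

-- ===== CLAIM (what is proved, stated in full; the proofs are below) =====
def Claim_equal_check_lists : Prop := ∀ (myList : List (List Int)), Dom_check_lists myList → Pre_check_lists myList → Spec_check_lists myList (check_lists myList)

-- ===== LEMMAS AND PROOFS =====

-- membership in the folded intersection = in the seed and in every later sublist
theorem mem_foldl_inter (x : Int) (rs : List (List Int)) (c0 : PySem.Set Int) :
    x ∈ rs.foldl (fun c s => PySem.Set.inter c (PySem.Set.ofList s)) c0 ↔
      x ∈ c0 ∧ ∀ s ∈ rs, x ∈ s := by
  induction rs generalizing c0 with
  | nil => simp
  | cons r rs ih =>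
    simp [List.foldl, ih, PySem.Set.mem_inter, PySem.Set.mem_ofList]
    tauto

-- B's option-valued fold, once seeded, is the plain intersection fold
theorem foldl_opt_inter (rs : List (List Int)) (c0 : PySem.Set Int) :
    rs.foldl (fun c sub =>
        let s := PySem.Set.ofList sub
        match c with
        | none => some s
        | some c => some (PySem.Set.inter c s)) (some c0)
      = some (rs.foldl (fun c s => PySem.Set.inter c (PySem.Set.ofList s)) c0) := by
  induction rs generalizing c0 with
  | nil => rfl
  | cons r rs ih => simp [List.foldl, ih]

-- A's inner loop counts the sublists after the first that contain x
theorem inner_count (L : List (List Int)) (x : Int) :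
    (PySem.List.pyRange 1 (L.length : Int) 1).foldl
        (fun a j => if (PySem.List.pyGetD L j []).contains x then a + 1 else a) (0 : Int)
      = ((L.drop 1).countP (fun s => s.contains x) : Int) := by
  have h := PySem.List.foldl_pyRange_pyGetD' (a := 1) (xs := L) (d := ([] : List Int))
        (f := fun (a : Int) (s : List Int) => if s.contains x then a + 1 else a) (init := 0) (by norm_num)
  refine h.trans ?_
  rw [PySem.List.foldl_if_add_one]
  simp

-- the two branch conditions agree
theorem cond_iff (l0 r1 : List Int) (rs : List (List Int)) (x : Int) :
    (((l0 :: r1 :: rs : List (List Int)).length : Int) - 1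
        = (PySem.List.pyRange 1 ((l0 :: r1 :: rs : List (List Int)).length : Int) 1).foldl
            (fun a j => if (PySem.List.pyGetD (l0 :: r1 :: rs) j []).contains x then a + 1 else a) (0 : Int))
      ↔ (PySem.Set.contains
            (rs.foldl (fun c s => PySem.Set.inter c (PySem.Set.ofList s)) (PySem.Set.ofList r1)) x = true) := by
  rw [inner_count]
  rw [PySem.Set.contains_iff, mem_foldl_inter]
  simp only [PySem.Set.mem_ofList]
  constructor
  · intro h
    have hcount : (r1 :: rs).countP (fun s => s.contains x) = (r1 :: rs).length := by
      have hle := List.countP_le_length (p := fun s => s.contains x) (l := r1 :: rs)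
      simp only [List.length_cons, List.drop_succ_cons, List.drop_zero] at h ⊢
      omega
    have := (List.countP_eq_length (p := fun s => s.contains x) (l := r1 :: rs)).mp hcount
    constructor
    · simpa using List.contains_iff_mem.mp (by simpa using this r1 (by simp))
    · intro s hs
      exact List.contains_iff_mem.mp (by simpa using this s (by simp [hs]))
  · rintro ⟨h1, h2⟩
    have hall : ∀ s ∈ (r1 :: rs), (fun s => s.contains x) s = true := by
      intro s hs
      rcases List.mem_cons.mp hs with rfl | hs
      · exact List.contains_iff_mem.mpr (by simpa using h1)
      · exact List.contains_iff_mem.mpr (h2 s hs)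
    have := (List.countP_eq_length (p := fun s => s.contains x) (l := r1 :: rs)).mpr hall
    simp only [List.length_cons, List.drop_succ_cons, List.drop_zero]
    rw [this]
    simp only [List.length_cons]
    omega

-- ===== VERDICT (by name: the statement is the Claim_ definition above) =====
theorem check_lists_spec : Claim_equal_check_lists := by
  intro myList _ hpre
  unfold Spec_check_lists check_lists check_lists_alt
  match myList with
  | [] => exact absurd rfl hpre.1
  | [l] => simp [PySem.List.pyRange_one_eq_nil, PySem.List.slice]; decide
  | l0 :: r1 :: rs =>
    have h3 : PySem.List.pyRange 0 3 1 = [0, 1, 2] := by decide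
    have hget0 : PySem.List.pyGetD (l0 :: r1 :: rs) 0 ([] : List Int) = l0 := by
      simp [pysem]
    have hslice : PySem.List.slice (l0 :: r1 :: rs) (some 1) none = r1 :: rs := by
      simp [pysem]
    simp only [h3, hget0, hslice, List.foldl_cons, List.foldl_nil,
      List.map_cons, List.map_nil, List.sum_cons, List.sum_nil]
    rw [foldl_opt_inter]
    have hc := fun x => cond_iff l0 r1 rs x
    simp only [List.length_cons] at hc ⊢
    simp only [hc]
    split_ifs <;> ring
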